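-- pv_equiv track=rewrite | github.com/EkipoAlfaBuenaOndaDinamitaEscuadronRana/Man_I_Love_Frogs | compilador/helpers/helper_functions.py | dec_to_as
-- ===== SOURCE A (Python) =====
-- def dec_to_as(exp):
--     exp.pop()
--     if "," in exp:
--         loc = exp.index(",")
--         while "," in exp:
--             exp = exp[loc + 1 :]
--             if "," in exp:
--                 loc = exp.index(",")
--     return exp
-- ===== SOURCE B (Python) =====
-- def dec_to_as(exp):
--     exp.pop()
--     for i in range(len(exp) - 1, -1, -1):
--         if exp[i] == ",":
--             return exp[i + 1:]
--     return exp
-- ===== Notes on version B (the rewrite author's own statement) =====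
-- stated objective: simpler
-- what changed: Replaces A's repeated first-comma search plus re-slicing while-loop with a single reverse scan for the last comma and one slice.
import Mathlib
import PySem

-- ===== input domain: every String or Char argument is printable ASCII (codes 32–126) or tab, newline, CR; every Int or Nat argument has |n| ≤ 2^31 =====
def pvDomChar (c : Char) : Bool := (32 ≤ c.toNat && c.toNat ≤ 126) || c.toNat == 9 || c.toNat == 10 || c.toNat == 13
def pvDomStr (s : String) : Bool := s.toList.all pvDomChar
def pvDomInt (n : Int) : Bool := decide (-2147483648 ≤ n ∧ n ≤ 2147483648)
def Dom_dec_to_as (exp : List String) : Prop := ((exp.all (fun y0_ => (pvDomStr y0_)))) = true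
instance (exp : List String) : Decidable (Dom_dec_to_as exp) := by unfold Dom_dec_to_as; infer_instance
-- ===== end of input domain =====

-- B replaces A's repeated first-comma search + re-slicing loop with one reverse scan for the
-- last comma and a single slice (simpler: one loop, one slice). Both programs pop the last element of the argument
-- in place; the equivalence proved here is about the RETURN value (the pop is the only
-- observable mutation and both perform it identically).

-- ===== PORT A =====
-- the 'while "," in exp' loop, state = (exp, loc); exp[loc+1:] with loc ≥ 0 is List.drop,
-- exp.index(",") under the membership guard is List.idxOf (both exact here)
def pvALoop (e : List String) (loc : Nat) : List String :=
  if h : "," ∈ e then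
    pvALoop (e.drop (loc + 1))
      (if "," ∈ e.drop (loc + 1) then (e.drop (loc + 1)).idxOf "," else loc)
  else e
termination_by e.length
decreasing_by
  have : e ≠ [] := List.ne_nil_of_mem h
  have : 0 < e.length := List.length_pos_of_ne_nil this
  simp [List.length_drop]; omega

def dec_to_as (exp : List String) : List String :=
  let e := exp.dropLast          -- exp.pop()
  if "," ∈ e then pvALoop e (e.idxOf ",") else e

-- ===== PORT B =====
-- 'for i in range(len(exp)-1, -1, -1)': fuel n is i+1; exp[i] via getD (i < length always,
-- so exact); exp[i+1:] is List.drop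
def pvBGo (e : List String) : Nat → List String
  | 0 => e
  | n + 1 => if e.getD n "" = "," then e.drop (n + 1) else pvBGo e n

def dec_to_as_alt (exp : List String) : List String :=
  let e := exp.dropLast          -- exp.pop()
  pvBGo e e.length

-- ===== PRECONDITION & SPEC =====
-- exp.pop() raises IndexError on the empty list (in A and in B alike)
def Pre_dec_to_as (exp : List String) : Prop := exp ≠ []
instance (exp : List String) : Decidable (Pre_dec_to_as exp) := by unfold Pre_dec_to_as; infer_instance
def pvWitness_dec_to_as : List String := (["a", ",", "b", "c"])
def Spec_dec_to_as (exp : List String) (out : List String) : Prop := out = dec_to_as_alt exp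
instance (exp : List String) (out : List String) : Decidable (Spec_dec_to_as exp out) := by unfold Spec_dec_to_as; infer_instance

-- ===== CLAIM (what is proved, stated in full; the proofs are below) =====
def Claim_equal_dec_to_as : Prop := ∀ (exp : List String), Dom_dec_to_as exp → Pre_dec_to_as exp → Spec_dec_to_as exp (dec_to_as exp)

-- ===== LEMMAS AND PROOFS =====

lemma pvBGo_succ (e : List String) (n : Nat) :
    pvBGo e (n + 1) = if e.getD n "" = "," then e.drop (n + 1) else pvBGo e n := rfl

lemma pvGetD_eq_comma (e : List String) (n : Nat) :
    e.getD n "" = "," ↔ e[n]? = some "," := by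
  rw [List.getD_eq_getElem?_getD]
  cases hg : e[n]? <;> simp

lemma pvBGo_no_comma (e : List String) (n : Nat)
    (h : ∀ i, i < n → e[i]? ≠ some ",") : pvBGo e n = e := by
  induction n with
  | zero => rfl
  | succ m ih =>
    have hm : ¬ e.getD m "" = "," := by
      rw [pvGetD_eq_comma]; exact h m (Nat.lt_succ_self m)
    rw [pvBGo_succ, if_neg hm]
    exact ih (fun i hi => h i (Nat.lt_succ_of_lt hi))

lemma pvBGo_last (e : List String) (k n : Nat)
    (hk : e[k]? = some ",") (hkn : k < n)
    (hlast : ∀ i, k < i → i < n → e[i]? ≠ some ",") :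
    pvBGo e n = e.drop (k + 1) := by
  induction n with
  | zero => omega
  | succ m ih =>
    by_cases hmk : m = k
    · subst hmk
      rw [pvBGo_succ, if_pos (pvGetD_eq_comma e m |>.mpr hk)]
    · have hkm : k < m := by omega
      have hm : ¬ e.getD m "" = "," := by
        rw [pvGetD_eq_comma]; exact hlast m hkm (Nat.lt_succ_self m)
      rw [pvBGo_succ, if_neg hm]
      exact ih hkm (fun i hi him => hlast i hi (Nat.lt_succ_of_lt him))

lemma pv_idxOf_le (e : List String) (k : Nat) (hk : e[k]? = some ",") :
    e.idxOf "," ≤ k := by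
  induction e generalizing k with
  | nil => simp at hk
  | cons x xs ih =>
    cases k with
    | zero =>
      simp at hk
      simp [hk]
    | succ m =>
      simp at hk
      by_cases hx : x = ","
      · simp [hx]
      · have := ih m hk
        simp [hx]
        omega

lemma pvALoop_last_aux (n : Nat) : ∀ (e : List String), e.length ≤ n → ∀ (k : Nat),
    e[k]? = some "," →
    (∀ i, k < i → i < e.length → e[i]? ≠ some ",") →
    pvALoop e (e.idxOf ",") = e.drop (k + 1) := by
  induction n with
  | zero =>
    intro e he k hk _
    have : e = [] := List.eq_nil_of_length_eq_zero (by omega)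
    subst this; simp at hk
  | succ m IH =>
    intro e he k hk hlast
    have hmem : "," ∈ e := List.mem_of_getElem? hk
    have hklen : k < e.length := (List.getElem?_eq_some_iff.mp hk).1
    set j := e.idxOf "," with hj
    have hjk : j ≤ k := pv_idxOf_le e k hk
    have hdropget : ∀ i, (e.drop (j + 1))[i]? = e[j + 1 + i]? := by
      intro i; rw [List.getElem?_drop]
    have hdroplen : (e.drop (j + 1)).length = e.length - (j + 1) := by
      simp [List.length_drop]
    rw [pvALoop, dif_pos hmem]
    by_cases hjk' : j = k
    · -- the first comma is also the last one: the dropped suffix has no comma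
      subst hjk'
      have hno : "," ∉ e.drop (j + 1) := by
        intro hm
        obtain ⟨i, hi, hgi⟩ := List.getElem_of_mem hm
        have hsome : (e.drop (j + 1))[i]? = some "," := by
          rw [List.getElem?_eq_getElem hi, hgi]
        rw [hdropget] at hsome
        exact hlast (j + 1 + i) (by omega) (by omega) hsome
      rw [if_neg hno, pvALoop, dif_neg hno]
    · -- the first comma is strictly earlier: recurse on the dropped suffix
      have hjk2 : j < k := by omega
      have hk' : (e.drop (j + 1))[k - j - 1]? = some "," := by
        rw [hdropget, (by omega : j + 1 + (k - j - 1) = k)]; exact hk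
      have hmem' : "," ∈ e.drop (j + 1) := List.mem_of_getElem? hk'
      rw [if_pos hmem']
      have hlast' : ∀ i, k - j - 1 < i → i < (e.drop (j + 1)).length →
          (e.drop (j + 1))[i]? ≠ some "," := by
        intro i hi hil
        rw [hdropget]
        exact hlast (j + 1 + i) (by omega) (by omega)
      rw [IH (e.drop (j + 1)) (by omega) (k - j - 1) hk' hlast', List.drop_drop]
      congr 1
      omega

lemma pv_exists_last (e : List String) (h : "," ∈ e) :
    ∃ k : Nat, e[k]? = some "," ∧ ∀ i, k < i → e[i]? ≠ some "," := by
  induction e with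
  | nil => simp at h
  | cons x xs ih =>
    by_cases hxs : "," ∈ xs
    · obtain ⟨k, hk, hl⟩ := ih hxs
      refine ⟨k + 1, ?_, ?_⟩
      · rw [List.getElem?_cons_succ]; exact hk
      · intro i hi
        cases i with
        | zero => omega
        | succ i' =>
          rw [List.getElem?_cons_succ]
          exact hl i' (by omega)
    · have hx : x = "," := by
        rcases List.mem_cons.mp h with h1 | h1
        · exact h1.symm
        · exact absurd h1 hxs
      refine ⟨0, by simp [hx], ?_⟩
      intro i hi
      cases i with
      | zero => omega
      | succ i' =>
        rw [List.getElem?_cons_succ]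
        intro hg
        exact hxs (List.mem_of_getElem? hg)

lemma pv_core (e : List String) :
    (if "," ∈ e then pvALoop e (e.idxOf ",") else e) = pvBGo e e.length := by
  by_cases h : "," ∈ e
  · obtain ⟨k, hk, hl⟩ := pv_exists_last e h
    have hklen : k < e.length := (List.getElem?_eq_some_iff.mp hk).1
    rw [if_pos h, pvALoop_last_aux e.length e le_rfl k hk (fun i hi _ => hl i hi),
        pvBGo_last e k e.length hk hklen (fun i hi _ => hl i hi)]
  · rw [if_neg h, pvBGo_no_comma]
    intro i _ hg
    exact h (List.mem_of_getElem? hg)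

-- ===== VERDICT (by name: the statement is the Claim_ definition above) =====
theorem dec_to_as_spec : Claim_equal_dec_to_as := by
  intro exp _ _
  unfold Spec_dec_to_as dec_to_as dec_to_as_alt
  exact pv_core exp.dropLast
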